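-- pv_equiv track=rewrite | github.com/YuLennyLiang/-Ariadne | AppTrace/earth/scripts/locality_check.py | check_adjacent_sequence
-- ===== SOURCE A (Python) =====
-- def check_adjacent_sequence(window, sequence_length):
--     """Checks for the presence of adjacent sequences of the given length where each element differs by 8."""
--     count = 0
--     # sort the window
--     window.sort()
--     # check if first seqence_length elements form a sequence,
--     # if so increment count and delete the sequence; if not, delete the first element
--     while len(window) >= sequence_length:
--         if all(window[i] + 8 == window[i + 1] for i in range(sequence_length - 1)):
--             count += 1
--             del window[:sequence_length]
--         else:
--             del window[0]
--     return count
-- ===== SOURCE B (Python) =====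
-- def check_adjacent_sequence(window, sequence_length):
--     """Single O(n log n) pass: count step-8 runs in sorted order, resetting after each
--     complete run of sequence_length (return value only; A sorts/empties window in place)."""
--     count = 0
--     run = 0
--     prev = None
--     for x in sorted(window):
--         run = run + 1 if (prev is not None and prev + 8 == x) else 1
--         if run == sequence_length:
--             count += 1
--             run = 0
--         prev = x
--     return count
-- ===== Notes on version B (the rewrite author's own statement) =====
-- stated objective: faster
-- what changed: A repeatedly re-checks the first sequence_length elements and deletes from the front of the list (quadratic); B makes one linear pass over the sorted list maintaining a current run length, counting a sequence each time the run reaches sequence_length.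
import Mathlib
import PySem

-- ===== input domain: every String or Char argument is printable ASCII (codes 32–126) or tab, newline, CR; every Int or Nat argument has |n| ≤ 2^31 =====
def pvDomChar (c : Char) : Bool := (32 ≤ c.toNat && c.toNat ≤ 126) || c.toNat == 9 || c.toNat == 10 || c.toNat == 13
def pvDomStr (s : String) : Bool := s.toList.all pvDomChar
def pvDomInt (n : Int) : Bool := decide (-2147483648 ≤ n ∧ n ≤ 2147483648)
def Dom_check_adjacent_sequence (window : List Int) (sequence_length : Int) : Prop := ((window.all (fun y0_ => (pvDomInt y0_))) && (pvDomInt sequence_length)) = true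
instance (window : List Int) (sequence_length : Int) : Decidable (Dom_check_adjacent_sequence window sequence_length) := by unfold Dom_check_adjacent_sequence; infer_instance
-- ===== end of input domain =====

-- B replaces A's delete-from-the-front rescan loop by one linear pass over the sorted
-- list maintaining a run counter (return value only: A sorts and empties `window` in
-- place, B leaves it untouched).

-- ===== PORT A =====
-- all(window[i] + 8 == window[i + 1] for i in range(sequence_length - 1))
def aChk (w : List Int) (L : Int) : Bool :=
  (PySem.List.pyRange 0 (L - 1) 1).all (fun i =>
    decide (PySem.List.pyGetD w i 0 + 8 = PySem.List.pyGetD w (i + 1) 0))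

-- the while loop; fuel bounds the iteration count (each iteration shortens the list
-- by at least one element whenever sequence_length ≥ 1, i.e. on Pre_)
def aLoop (L : Int) : Nat → List Int → Int
  | 0, _ => 0
  | fuel + 1, w =>
    if L ≤ (w.length : Int) then
      if aChk w L then 1 + aLoop L fuel (PySem.List.slice w (some L) none)
      else aLoop L fuel w.tail
    else 0

def check_adjacent_sequence (window : List Int) (sequence_length : Int) : Int :=
  let s := PySem.List.sorted window (fun x => x) false
  aLoop sequence_length (s.length + 1) s

-- ===== PORT B =====
-- prev is not None and prev + 8 == x
def matchPrev (prev : Option Int) (x : Int) : Bool :=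
  match prev with
  | some p => decide (p + 8 = x)
  | none => false

-- the for loop of Source B: state (prev, count, run)
def bLoop (L : Int) : List Int → Option Int → Int → Int → Int
  | [], _, count, _ => count
  | x :: xs, prev, count, run =>
    let run' := if matchPrev prev x then run + 1 else 1
    if run' = L then bLoop L xs (some x) (count + 1) 0
    else bLoop L xs (some x) count run'

def check_adjacent_sequence_alt (window : List Int) (sequence_length : Int) : Int :=
  bLoop sequence_length (PySem.List.sorted window (fun x => x) false) none 0 0

-- ===== PRECONDITION & SPEC =====
-- Pre_ excludes sequence_length ≤ 0, on which A's while loop never terminates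
-- (del window[:L] removes nothing or not the front), so A never returns there.
def Pre_check_adjacent_sequence (window : List Int) (sequence_length : Int) : Prop :=
  1 ≤ sequence_length

instance (window : List Int) (sequence_length : Int) : Decidable (Pre_check_adjacent_sequence window sequence_length) := by
  unfold Pre_check_adjacent_sequence; infer_instance

def pvWitness_check_adjacent_sequence : List Int × Int := ([16, 0, 8, 3], 2)

def Spec_check_adjacent_sequence (window : List Int) (sequence_length : Int) (out : Int) : Prop := out = check_adjacent_sequence_alt window sequence_length
instance (window : List Int) (sequence_length : Int) (out : Int) : Decidable (Spec_check_adjacent_sequence window sequence_length out) := by unfold Spec_check_adjacent_sequence; infer_instance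

-- ===== CLAIM (what is proved, stated in full; the proofs are below) =====
def Claim_equal_check_adjacent_sequence : Prop := ∀ (window : List Int) (sequence_length : Int), Dom_check_adjacent_sequence window sequence_length → Pre_check_adjacent_sequence window sequence_length → Spec_check_adjacent_sequence window sequence_length (check_adjacent_sequence window sequence_length)

-- ===== LEMMAS AND PROOFS =====

-- adjacent elements differ by exactly 8, structurally
def chainB : List Int → Bool
  | [] => true
  | [_] => true
  | x :: y :: t => decide (x + 8 = y) && chainB (y :: t)

-- one unfolding step of the loop
theorem bLoop_cons (L x : Int) (xs : List Int) (prev : Option Int) (c r : Int) :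
    bLoop L (x :: xs) prev c r =
      (if (if matchPrev prev x then r + 1 else 1) = L then bLoop L xs (some x) (c + 1) 0
       else bLoop L xs (some x) c (if matchPrev prev x then r + 1 else 1)) := rfl

-- count accumulator is additive
theorem bLoop_add (L : Int) : ∀ (xs : List Int) (prev : Option Int) (c r : Int),
    bLoop L xs prev c r = c + bLoop L xs prev 0 r := by
  intro xs
  induction xs with
  | nil => intro prev c r; simp [bLoop]
  | cons x xs ih =>
    intro prev c r
    simp only [bLoop]
    by_cases h : (if matchPrev prev x then r + 1 else 1) = L
    · rw [if_pos h, if_pos h, ih (some x) (c + 1) 0, ih (some x) (0 + 1) 0]; ring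
    · rw [if_neg h, if_neg h, ih (some x) c]

-- too few elements left: no further count
theorem bLoop_short (L : Int) : ∀ (xs : List Int) (prev : Option Int) (c r : Int),
    0 ≤ r → r + xs.length < L → bLoop L xs prev c r = c := by
  intro xs
  induction xs with
  | nil => intro prev c r _ _; simp [bLoop]
  | cons x xs ih =>
    intro prev c r hr hlt
    simp only [List.length_cons] at hlt
    push_cast at hlt
    simp only [bLoop]
    by_cases hm : matchPrev prev x = true
    · rw [if_pos hm, if_neg (by omega)]
      exact ih (some x) c (r + 1) (by omega) (by omega)
    · rw [if_neg hm, if_neg (by omega)]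
      exact ih (some x) c 1 (by omega) (by omega)

-- with run = 0 the previous element is irrelevant
theorem bLoop_fresh (L : Int) (xs : List Int) (prev : Option Int) (c : Int) :
    bLoop L xs prev c 0 = bLoop L xs none c 0 := by
  cases xs with
  | nil => rfl
  | cons x t =>
    simp only [bLoop]
    have h1 : (if matchPrev prev x then (0 : Int) + 1 else 1) = 1 := by
      by_cases hm : matchPrev prev x = true <;> simp [hm]
    have h2 : (if matchPrev none x then (0 : Int) + 1 else 1) = 1 := by
      simp [matchPrev]
    rw [h1, h2]

-- a mismatching previous element is like no previous element
theorem bLoop_mismatch (L : Int) (p y : Int) (h : ¬ p + 8 = y) (ys : List Int) (c r : Int) :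
    bLoop L (y :: ys) (some p) c r = bLoop L (y :: ys) none c 0 := by
  simp only [bLoop]
  have h1 : matchPrev (some p) y = false := by simp [matchPrev, h]
  have h2 : matchPrev none y = false := rfl
  rw [h1, h2]
  simp

-- traverse a chain segment that does not complete a run
theorem consume_lt (L : Int) : ∀ (seg : List Int) (p : Int) (rest : List Int)
    (prev : Option Int) (c r : Int),
    chainB (p :: seg) = true →
    (matchPrev prev p = true ∨ r = 0) →
    0 ≤ r → r + 1 + seg.length < L →
    bLoop L (p :: (seg ++ rest)) prev c r
      = bLoop L rest (some (seg.getLastD p)) c (r + 1 + seg.length) := by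
  intro seg
  induction seg with
  | nil =>
    intro p rest prev c r hch hm hr hlt
    simp only [List.length_nil, Nat.cast_zero, add_zero] at hlt ⊢
    simp only [List.nil_append, bLoop, List.getLastD]
    have hrun : (if matchPrev prev p then r + 1 else 1) = r + 1 := by
      rcases hm with hm | hm
      · rw [if_pos hm]
      · subst hm; split <;> ring
    rw [hrun, if_neg (by omega)]
  | cons x seg' ih =>
    intro p rest prev c r hch hm hr hlt
    have hch' : p + 8 = x ∧ chainB (x :: seg') = true := by
      simpa [chainB] using hch
    simp only [List.length_cons] at hlt
    push_cast at hlt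
    simp only [List.cons_append]
    rw [bLoop_cons]
    have hrun : (if matchPrev prev p then r + 1 else 1) = r + 1 := by
      rcases hm with hm | hm
      · rw [if_pos hm]
      · subst hm; split <;> ring
    rw [hrun, if_neg (by omega)]
    rw [ih x rest (some p) c (r + 1) hch'.2
        (Or.inl (by simp [matchPrev, hch'.1])) (by omega) (by push_cast; omega)]
    simp only [List.getLastD_cons]
    congr 1
    push_cast [List.length_cons]
    ring

-- traverse a chain segment that completes exactly one run
theorem consume_eq (L : Int) : ∀ (seg : List Int) (p : Int) (rest : List Int)
    (prev : Option Int) (c r : Int),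
    chainB (p :: seg) = true →
    (matchPrev prev p = true ∨ r = 0) →
    0 ≤ r → r + 1 + seg.length = L →
    bLoop L (p :: (seg ++ rest)) prev c r
      = bLoop L rest (some (seg.getLastD p)) (c + 1) 0 := by
  intro seg
  induction seg with
  | nil =>
    intro p rest prev c r hch hm hr heq
    simp only [List.length_nil, Nat.cast_zero, add_zero] at heq
    simp only [List.nil_append, bLoop, List.getLastD]
    have hrun : (if matchPrev prev p then r + 1 else 1) = r + 1 := by
      rcases hm with hm | hm
      · rw [if_pos hm]
      · subst hm; split <;> ring
    rw [hrun, if_pos heq]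
  | cons x seg' ih =>
    intro p rest prev c r hch hm hr heq
    have hch' : p + 8 = x ∧ chainB (x :: seg') = true := by
      simpa [chainB] using hch
    simp only [List.length_cons] at heq
    push_cast at heq
    simp only [List.cons_append]
    rw [bLoop_cons]
    have hrun : (if matchPrev prev p then r + 1 else 1) = r + 1 := by
      rcases hm with hm | hm
      · rw [if_pos hm]
      · subst hm; split <;> ring
    rw [hrun, if_neg (by omega)]
    rw [ih x rest (some p) c (r + 1) hch'.2
        (Or.inl (by simp [matchPrev, hch'.1])) (by omega) (by push_cast; omega)]
    simp only [List.getLastD_cons]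

-- a maximal chain prefix shorter than L contributes nothing
theorem skip_chain (L : Int) : ∀ (seg : List Int) (p y : Int) (rest : List Int) (c : Int),
    chainB (seg ++ [p]) = true → ((seg.length : Int) + 1) < L → ¬ p + 8 = y →
    bLoop L (seg ++ p :: y :: rest) none c 0 = bLoop L (y :: rest) none c 0 := by
  intro seg p y rest c hch hlt hne
  obtain ⟨q, seg2, heq⟩ : ∃ q seg2, seg ++ [p] = q :: seg2 := by
    cases h : seg ++ [p] with
    | nil => simp at h
    | cons a b => exact ⟨a, b, rfl⟩
  have hlist : seg ++ p :: y :: rest = q :: (seg2 ++ (y :: rest)) := by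
    have : seg ++ p :: y :: rest = (seg ++ [p]) ++ y :: rest := by simp
    rw [this, heq]; simp
  have hlen : (seg2.length : Int) = (seg.length : Int) := by
    have := congrArg List.length heq
    simp at this
    omega
  have hlast : seg2.getLastD q = p := by
    have h1 : (seg ++ [p]).getLastD 0 = p := by simp
    rw [heq, List.getLastD_cons] at h1
    exact h1
  rw [hlist,
    consume_lt L seg2 q (y :: rest) none c 0 (by rw [← heq]; exact hch)
      (Or.inr rfl) le_rfl (by omega), hlast]
  rw [bLoop_mismatch L p y hne]

-- a chain stays a chain when the first element is dropped
theorem chainB_tail (x : Int) (l : List Int) (h : chainB (x :: l) = true) : chainB l = true := by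
  cases l with
  | nil => rfl
  | cons y t =>
    have h2 : x + 8 = y ∧ chainB (y :: t) = true := by simpa [chainB] using h
    exact h2.2

-- a failed adjacency check locates a break within the first k elements
theorem break_decomp : ∀ (s : List Int) (k : Nat), chainB (s.take k) = false →
    ∃ seg p y rest, s = seg ++ p :: y :: rest ∧ chainB (seg ++ [p]) = true ∧
      seg.length + 1 < k ∧ ¬ p + 8 = y := by
  intro s
  induction s with
  | nil => intro k h; simp [List.take_nil, chainB] at h
  | cons x t ih =>
    intro k h
    match k, t with
    | 0, t => simp [chainB] at h
    | k + 1, [] => simp [chainB] at h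
    | 1, y :: t' => simp [chainB] at h
    | k'' + 2, y :: t' =>
      have hform : (x :: y :: t').take (k'' + 2) = x :: ((y :: t').take (k'' + 1)) := rfl
      have hform2 : (y :: t').take (k'' + 1) = y :: t'.take k'' := rfl
      by_cases hxy : x + 8 = y
      · have hsub : chainB ((y :: t').take (k'' + 1)) = false := by
          rw [hform, hform2] at h
          simp [chainB, hxy] at h
          rw [hform2]
          simpa [chainB] using h
        obtain ⟨seg, p, y0, rest, ht, hchain, hlen, hne⟩ := ih (k'' + 1) hsub
        refine ⟨x :: seg, p, y0, rest, by simp [ht], ?_, by simp; omega, hne⟩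
        cases seg with
        | nil =>
          have hp : p = y := by
            have := congrArg (fun l => l.headD 0) ht
            simp at this
            omega
          simp [chainB, hxy, hp]
        | cons z seg' =>
          have hz : z = y := by
            have := congrArg (fun l => l.headD 0) ht
            simp at this
            omega
          have : chainB (x :: z :: (seg' ++ [p])) = true := by
            simp only [chainB, Bool.and_eq_true_iff]
            constructor
            · simp [hz, hxy]
            · simpa using hchain
          simpa using this
      · exact ⟨[], x, y, t', by simp, by simp [chainB], by simp only [List.length_nil]; omega, hxy⟩

-- chainB on a prefix as an indexwise statement
theorem chainB_take_iff : ∀ (m : Nat) (s : List Int), m + 1 ≤ s.length →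
    (chainB (s.take (m + 1)) = true ↔ ∀ k < m, s.getD k 0 + 8 = s.getD (k + 1) 0) := by
  intro m
  induction m with
  | zero =>
    intro s hlen
    obtain ⟨x, t, rfl⟩ : ∃ x t, s = x :: t := by
      cases s with
      | nil => simp at hlen
      | cons a b => exact ⟨a, b, rfl⟩
    simp [chainB]
  | succ m ih =>
    intro s hlen
    obtain ⟨x, y, t', rfl⟩ : ∃ x y t', s = x :: y :: t' := by
      cases s with
      | nil => simp at hlen
      | cons a b =>
        cases b with
        | nil => simp at hlen
        | cons c d => exact ⟨a, c, d, rfl⟩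
    have hform : (x :: y :: t').take (m + 2) = x :: ((y :: t').take (m + 1)) := rfl
    have hlen' : m + 1 ≤ (y :: t').length := by simpa using hlen
    rw [hform]
    have hsplit : chainB (x :: ((y :: t').take (m + 1))) = true ↔
        (x + 8 = y ∧ chainB ((y :: t').take (m + 1)) = true) := by
      have : (y :: t').take (m + 1) = y :: t'.take m := rfl
      rw [this]
      simp [chainB]
    rw [hsplit, ih (y :: t') hlen']
    constructor
    · rintro ⟨h0, hrec⟩ k hk
      cases k with
      | zero => simpa using h0
      | succ j =>
        have := hrec j (by omega)
        simpa using this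
    · intro hall
      refine ⟨by simpa using hall 0 (by omega), ?_⟩
      intro j hj
      have := hall (j + 1) (by omega)
      simpa using this

-- A's generator-expression check equals the structural chain test on the first L elements
theorem aChk_eq_chainB (s : List Int) (L : Int) (hL : 1 ≤ L) (hlen : L ≤ (s.length : Int)) :
    aChk s L = chainB (s.take L.toNat) := by
  obtain ⟨m, hm⟩ : ∃ m : Nat, L.toNat = m + 1 := ⟨(L - 1).toNat, by omega⟩
  have hL1 : L - 1 = (m : Int) := by omega
  have hAll : aChk s L = true ↔ ∀ k < m, s.getD k 0 + 8 = s.getD (k + 1) 0 := by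
    unfold aChk
    rw [hL1, PySem.List.pyRange_one]
    simp only [List.all_map, List.all_eq_true, List.mem_range, Function.comp,
      zero_add, sub_zero, Int.toNat_natCast, decide_eq_true_iff]
    constructor
    · intro h k hk
      have := h k hk
      have hc : ((k : Int) + 1) = ((k + 1 : Nat) : Int) := by push_cast; ring
      rw [hc, PySem.List.pyGetD_natCast, PySem.List.pyGetD_natCast] at this
      exact this
    · intro h k hk
      have := h k hk
      have hc : ((k : Int) + 1) = ((k + 1 : Nat) : Int) := by push_cast; ring
      rw [hc, PySem.List.pyGetD_natCast, PySem.List.pyGetD_natCast]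
      exact this
  have hTake := chainB_take_iff m s (by omega)
  rw [hm]
  cases hA : aChk s L with
  | true => exact (hTake.mpr (hAll.mp hA)).symm
  | false =>
    cases hC : chainB (s.take (m + 1)) with
    | true => exact absurd (hAll.mpr (hTake.mp hC)) (by simp [hA])
    | false => rfl

-- the main loop correspondence
theorem aLoop_eq (L : Int) (hL : 1 ≤ L) : ∀ (fuel : Nat) (s : List Int), s.length < fuel →
    aLoop L fuel s = bLoop L s none 0 0 := by
  intro fuel
  induction fuel with
  | zero => intro s h; omega
  | succ f ihf =>
    intro s hlen
    show (if L ≤ (s.length : Int) then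
        (if aChk s L then 1 + aLoop L f (PySem.List.slice s (some L) none)
         else aLoop L f s.tail) else 0) = bLoop L s none 0 0
    by_cases hc : L ≤ (s.length : Int)
    · rw [if_pos hc]
      have hchk := aChk_eq_chainB s L hL hc
      have htn : 1 ≤ L.toNat := by omega
      have hcast : (L.toNat : Int) = L := by omega
      have hlen2 : L.toNat ≤ s.length := by omega
      have hs1 : 1 ≤ s.length := by omega
      by_cases hch : chainB (s.take L.toNat) = true
      · rw [if_pos (by rw [hchk]; exact hch)]
        obtain ⟨p, seg, hseg⟩ : ∃ p seg, s.take L.toNat = p :: seg := by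
          cases hT : s.take L.toNat with
          | nil =>
            exfalso
            have := congrArg List.length hT
            simp only [List.length_take, List.length_nil] at this
            omega
          | cons a b => exact ⟨a, b, rfl⟩
        have hsplit : s = p :: (seg ++ s.drop L.toNat) := by
          conv_lhs => rw [← List.take_append_drop L.toNat s]
          rw [hseg]
          simp
        have hlseg : (seg.length : Int) = L - 1 := by
          have h1 := congrArg List.length hseg
          simp [List.length_take] at h1
          omega
        have hB : bLoop L s none 0 0 = 1 + bLoop L (s.drop L.toNat) none 0 0 := by
          calc bLoop L s none 0 0
              = bLoop L (p :: (seg ++ s.drop L.toNat)) none 0 0 := by rw [← hsplit]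
            _ = bLoop L (s.drop L.toNat) (some (seg.getLastD p)) (0 + 1) 0 :=
                consume_eq L seg p _ none 0 0 (by rw [← hseg]; exact hch)
                  (Or.inr rfl) le_rfl (by rw [hlseg]; ring)
            _ = bLoop L (s.drop L.toNat) none (0 + 1) 0 := bLoop_fresh L _ _ _
            _ = (0 + 1) + bLoop L (s.drop L.toNat) none 0 0 := bLoop_add L _ _ _ _
            _ = 1 + bLoop L (s.drop L.toNat) none 0 0 := by ring
        have hslice : PySem.List.slice s (some L) none = s.drop L.toNat :=
          PySem.List.slice_from _ (by omega)
        rw [hslice, ihf _ (by rw [List.length_drop]; omega), hB]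
      · rw [if_neg (by rw [hchk]; exact hch)]
        have hchF : chainB (s.take L.toNat) = false := by
          simpa using hch
        obtain ⟨seg, p, y, rest, hs, hcseg, hlenseg, hne⟩ := break_decomp s L.toNat hchF
        rw [ihf s.tail (by simp [List.length_tail]; omega)]
        have hseglt : (seg.length : Int) + 1 < L := by
          have : seg.length + 1 < L.toNat := hlenseg
          omega
        have h1 : bLoop L s none 0 0 = bLoop L (y :: rest) none 0 0 := by
          rw [hs]
          exact skip_chain L seg p y rest 0 hcseg hseglt hne
        have h2 : bLoop L s.tail none 0 0 = bLoop L (y :: rest) none 0 0 := by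
          cases seg with
          | nil => simp [hs]
          | cons z seg' =>
            have ht : s.tail = seg' ++ p :: y :: rest := by rw [hs]; rfl
            rw [ht]
            apply skip_chain L seg' p y rest 0 ?_ ?_ hne
            · refine chainB_tail z _ ?_
              simpa using hcseg
            · have : (z :: seg').length = seg'.length + 1 := rfl
              simp only [List.length_cons] at hseglt
              push_cast at hseglt ⊢
              omega
        rw [h1, h2]
    · rw [if_neg hc]
      symm
      exact bLoop_short L s none 0 0 le_rfl (by push_cast; omega)

-- ===== VERDICT (by name: the statement is the Claim_ definition above) =====
theorem check_adjacent_sequence_spec : Claim_equal_check_adjacent_sequence := by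
  intro window L _ hPre
  unfold Spec_check_adjacent_sequence check_adjacent_sequence check_adjacent_sequence_alt
  exact aLoop_eq L hPre _ _ (Nat.lt_succ_self _)
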